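-- pv_equiv track=rewrite | github.com/globalchithi/nodejsapi | send-teams-notification-ssl-fix.py | clean_xml_content
-- ===== SOURCE A (Python) =====
-- def clean_xml_content(xml_content):
--     """Clean and fix malformed XML content"""
--     # Remove any content after the closing </assemblies> tag
--     if '</assemblies>' in xml_content:
--         xml_content = xml_content[:xml_content.rfind('</assemblies>') + len('</assemblies>')]
--
--     # Remove any extra content or junk
--     lines = xml_content.split('\n')
--     cleaned_lines = []
--     in_xml = False
--
--     for line in lines:
--         line = line.strip()
--         if line.startswith('<assemblies') or in_xml:
--             in_xml = True
--             cleaned_lines.append(line)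
--             if line.endswith('</assemblies>'):
--                 break
--
--     return '\n'.join(cleaned_lines)
-- ===== SOURCE B (Python) =====
-- def clean_xml_content(xml_content):
--     """Clean and fix malformed XML content"""
--     if '</assemblies>' in xml_content:
--         xml_content = xml_content[:xml_content.rfind('</assemblies>') + len('</assemblies>')]
--
--     lines = [l.strip() for l in xml_content.split('\n')]
--     start = next((i for i, l in enumerate(lines) if l.startswith('<assemblies')), None)
--     if start is None:
--         return ''
--     tail = lines[start:]
--     end = next((i for i, l in enumerate(tail) if l.endswith('</assemblies>')), len(tail) - 1)
--     return '\n'.join(tail[:end + 1])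
-- ===== Notes on version B (the rewrite author's own statement) =====
-- stated objective: idiomatic
-- what changed: Replaces the in_xml flag/break state machine with explicit boundary-index search (first line starting with '<assemblies', first subsequent line ending with '</assemblies>') followed by a slice and join.
import Mathlib
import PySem

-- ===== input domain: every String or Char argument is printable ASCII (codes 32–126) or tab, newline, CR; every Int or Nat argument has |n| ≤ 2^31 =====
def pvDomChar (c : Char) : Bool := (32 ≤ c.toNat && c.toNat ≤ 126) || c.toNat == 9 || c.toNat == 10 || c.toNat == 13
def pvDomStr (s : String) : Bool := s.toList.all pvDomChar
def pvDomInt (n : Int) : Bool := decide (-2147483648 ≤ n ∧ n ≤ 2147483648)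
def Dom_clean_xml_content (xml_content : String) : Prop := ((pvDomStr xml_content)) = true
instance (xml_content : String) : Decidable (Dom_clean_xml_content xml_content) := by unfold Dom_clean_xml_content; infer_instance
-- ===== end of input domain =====

-- B replaces A's in_xml flag/break state machine by boundary-index search plus a slice (idiomatic; same cost).

-- shared by both ports: the common truncation after the last '</assemblies>' (identical in A and B)
def pvTrunc (s : String) : String :=
  if PySem.Str.isIn "</assemblies>" s then
    PySem.Str.slice s none (some (PySem.Str.rfind s "</assemblies>" + 13))
  else s

-- xml_content.split('\n') ('\n' is non-empty, so split? always returns some)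
def pySplitNL (s : String) : List String :=
  (PySem.Str.split? s "\n").getD []

-- ===== PORT A =====
-- the for-loop with the in_xml flag; break becomes stopping the recursion
def cleanLoopA : List String → Bool → List String
  | [], _ => []
  | l :: rest, inXml =>
    let l' := PySem.Str.strip l
    if PySem.Str.startswith l' "<assemblies" || inXml then
      if PySem.Str.endswith l' "</assemblies>" then [l']
      else l' :: cleanLoopA rest true
    else cleanLoopA rest inXml

def clean_xml_content (xml_content : String) : String :=
  let s := pvTrunc xml_content
  let lines := pySplitNL s
  PySem.Str.join "\n" (cleanLoopA lines false)

-- ===== PORT B =====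
def clean_xml_content_alt (xml_content : String) : String :=
  let s := pvTrunc xml_content
  let lines := (pySplitNL s).map PySem.Str.strip
  match lines.findIdx? (fun l => PySem.Str.startswith l "<assemblies") with
  | none => ""
  | some start =>
    let tail := lines.drop start
    let e := (tail.findIdx? (fun l => PySem.Str.endswith l "</assemblies>")).getD (tail.length - 1)
    PySem.Str.join "\n" (tail.take (e + 1))

-- ===== PRECONDITION & SPEC =====
def Spec_clean_xml_content (xml_content : String) (out : String) : Prop := out = clean_xml_content_alt xml_content
instance (xml_content : String) (out : String) : Decidable (Spec_clean_xml_content xml_content out) := by unfold Spec_clean_xml_content; infer_instance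

-- ===== CLAIM (what is proved, stated in full; the proofs are below) =====
def Claim_equal_clean_xml_content : Prop := ∀ (xml_content : String), Dom_clean_xml_content xml_content → Spec_clean_xml_content xml_content (clean_xml_content xml_content)

-- ===== LEMMAS AND PROOFS =====

-- take (len-1)+1 of a list is the whole list (covers the empty-tail corner of the getD default)
theorem pvTakePredSucc {α : Type} (xs : List α) : xs.take (xs.length - 1 + 1) = xs := by
  cases xs <;> simp

-- once the start line is hit, the flag makes both flag values behave the same
theorem cleanLoopA_false_of_start (l : String) (rest : List String)
    (hs : PySem.Str.startswith (PySem.Str.strip l) "<assemblies" = true) :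
    cleanLoopA (l :: rest) false = cleanLoopA (l :: rest) true := by
  simp only [cleanLoopA, hs, Bool.or_true, Bool.or_false, if_true]

-- once in_xml is true, A takes every (stripped) line up to and including the first one ending with '</assemblies>'
theorem cleanLoopA_true_eq (ls : List String) :
    cleanLoopA ls true =
      (ls.map PySem.Str.strip).take
        (((ls.map PySem.Str.strip).findIdx? (fun l => PySem.Str.endswith l "</assemblies>")).getD
          ((ls.map PySem.Str.strip).length - 1) + 1) := by
  induction ls with
  | nil => rfl
  | cons l rest ih =>
    simp only [cleanLoopA, List.map_cons, List.findIdx?_cons, Bool.or_true, if_true]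
    by_cases h : PySem.Str.endswith (PySem.Str.strip l) "</assemblies>" = true
    · rw [if_pos h, if_pos h]
      simp only [Option.getD_some, zero_add, List.take_succ_cons, List.take_zero]
    · rw [if_neg h, if_neg h]
      cases hf : (rest.map PySem.Str.strip).findIdx? (fun l => PySem.Str.endswith l "</assemblies>") with
      | some k =>
        rw [hf] at ih
        simp only [Option.map_some, Option.getD_some, List.take_succ_cons] at ih ⊢
        rw [ih]
      | none =>
        rw [hf] at ih
        simp only [Option.map_none, Option.getD_none, List.length_cons,
          Nat.add_sub_cancel, List.take_succ_cons] at ih ⊢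
        rw [ih, pvTakePredSucc, List.take_length]

-- the loop starting with in_xml = false equals B's index-search-and-slice on the stripped lines
theorem cleanLoopA_false_eq (ls : List String) :
    cleanLoopA ls false =
      (match (ls.map PySem.Str.strip).findIdx? (fun l => PySem.Str.startswith l "<assemblies") with
       | none => []
       | some start =>
         let tail := (ls.map PySem.Str.strip).drop start
         tail.take (((tail.findIdx? (fun l => PySem.Str.endswith l "</assemblies>")).getD (tail.length - 1)) + 1)) := by
  induction ls with
  | nil => rfl
  | cons l rest ih =>
    by_cases hs : PySem.Str.startswith (PySem.Str.strip l) "<assemblies" = true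
    · rw [cleanLoopA_false_of_start l rest hs, cleanLoopA_true_eq]
      simp only [List.map_cons, List.findIdx?_cons, hs, if_true, List.drop_zero]
    · simp only [cleanLoopA, hs, Bool.false_or, Bool.false_eq_true, if_false,
        List.map_cons, List.findIdx?_cons]
      rw [ih]
      cases (rest.map PySem.Str.strip).findIdx? (fun l => PySem.Str.startswith l "<assemblies") with
      | none => simp only [Option.map_none]
      | some k => simp only [Option.map_some, List.drop_succ_cons]

-- ===== VERDICT (by name: the statement is the Claim_ definition above) =====
theorem clean_xml_content_spec : Claim_equal_clean_xml_content := by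
  intro x _
  unfold Spec_clean_xml_content clean_xml_content clean_xml_content_alt
  simp only [cleanLoopA_false_eq]
  cases ((pySplitNL (pvTrunc x)).map PySem.Str.strip).findIdx?
      (fun l => PySem.Str.startswith l "<assemblies") with
  | none => rfl
  | some k => rfl
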